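-- pv_equiv track=rewrite | github.com/monika-chauhan/Sliding-Window-Pattern-Questions | Sliding Window Questions/Count Negative elements present in every k-length subarray.py | countNegElementInKLengthSubarray
-- ===== SOURCE A (Python) =====
-- def countNegElementInKLengthSubarray(nums, k):
--     count = 0
--     start = 0
--     result = []
--     for end in range(len(nums)):
--         if nums[end] < 0:
--             count += 1
--
--         if end - start + 1 == k:
--             result.append(count)
--             if nums[start] < 0:
--                 count -= 1
--             start += 1
--     return result
-- ===== SOURCE B (Python) =====
-- def countNegElementInKLengthSubarray(nums, k):
--     pref = [0]
--     for x in nums: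
--         pref.append(pref[-1] + (1 if x < 0 else 0))
--     n = len(nums)
--     if k < 1 or n < k:
--         return []
--     return [pref[s + k] - pref[s] for s in range(n - k + 1)]
-- ===== Notes on version B (the rewrite author's own statement) =====
-- stated objective: alternative
-- what changed: Replaces the incremental sliding-window loop (running count adjusted as the window slides) by a prefix-sum table of negative counts plus a second pass that emits each window count as a difference of two prefix values.
import Mathlib
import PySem

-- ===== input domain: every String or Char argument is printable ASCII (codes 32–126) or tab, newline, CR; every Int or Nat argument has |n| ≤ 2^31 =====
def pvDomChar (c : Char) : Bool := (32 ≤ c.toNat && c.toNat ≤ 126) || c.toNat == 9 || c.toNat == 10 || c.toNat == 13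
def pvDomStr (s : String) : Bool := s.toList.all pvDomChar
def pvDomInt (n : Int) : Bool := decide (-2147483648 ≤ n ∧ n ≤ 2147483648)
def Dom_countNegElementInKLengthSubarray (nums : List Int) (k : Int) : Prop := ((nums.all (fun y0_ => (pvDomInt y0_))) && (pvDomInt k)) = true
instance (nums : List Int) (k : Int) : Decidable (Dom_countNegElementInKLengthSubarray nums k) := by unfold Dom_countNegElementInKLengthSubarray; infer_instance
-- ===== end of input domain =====

-- B replaces A's incremental sliding-window count by a prefix-sum table plus window differences (alternative decomposition, same O(n) cost).

-- ===== PORT A =====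
def countNegElementInKLengthSubarray (nums : List Int) (k : Int) : List Int :=
  ((PySem.List.pyRange 0 (nums.length : Int) 1).foldl
    (fun (st : Int × Int × List Int) e =>
      let count := st.1
      let start := st.2.1
      let result := st.2.2
      let count := if PySem.List.pyGetD nums e 0 < 0 then count + 1 else count
      if e - start + 1 = k then
        (if PySem.List.pyGetD nums start 0 < 0 then count - 1 else count,
         start + 1, result ++ [count])
      else (count, start, result))
    (0, 0, [])).2.2

-- ===== PORT B =====
def countNegElementInKLengthSubarray_alt (nums : List Int) (k : Int) : List Int :=
  let pref := nums.foldl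
    (fun pref x => pref ++ [PySem.List.pyGetD pref (-1) 0 + (if x < 0 then (1:Int) else 0)]) [0]
  if k < 1 ∨ (nums.length : Int) < k then []
  else (PySem.List.pyRange 0 ((nums.length : Int) - k + 1) 1).map
    (fun s => PySem.List.pyGetD pref (s + k) 0 - PySem.List.pyGetD pref s 0)

-- ===== PRECONDITION & SPEC =====
def Spec_countNegElementInKLengthSubarray (nums : List Int) (k : Int) (out : List Int) : Prop := out = countNegElementInKLengthSubarray_alt nums k
instance (nums : List Int) (k : Int) (out : List Int) : Decidable (Spec_countNegElementInKLengthSubarray nums k out) := by unfold Spec_countNegElementInKLengthSubarray; infer_instance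

-- ===== CLAIM (what is proved, stated in full; the proofs are below) =====
def Claim_equal_countNegElementInKLengthSubarray : Prop := ∀ (nums : List Int) (k : Int), Dom_countNegElementInKLengthSubarray nums k → Spec_countNegElementInKLengthSubarray nums k (countNegElementInKLengthSubarray nums k)

-- ===== LEMMAS AND PROOFS =====

-- number of negative elements of a list, as an Int
def negs (l : List Int) : Int := (l.countP (fun x => decide (x < 0)) : Int)

lemma negs_nil : negs [] = 0 := rfl

lemma negs_append (l₁ l₂ : List Int) : negs (l₁ ++ l₂) = negs l₁ + negs l₂ := by
  simp [negs, List.countP_append]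

lemma negs_cons (x : Int) (l : List Int) :
    negs (x :: l) = (if x < 0 then 1 else 0) + negs l := by
  by_cases h : x < 0 <;> simp [negs, h] <;> ring

lemma negs_singleton (x : Int) : negs [x] = if x < 0 then 1 else 0 := by
  rw [negs_cons, negs_nil, add_zero]

-- B's prefix accumulator unfolded
lemma pref_fold (xs acc : List Int) (c : Int) (h : PySem.List.pyGetD acc (-1) 0 = c) :
    xs.foldl (fun pref x => pref ++ [PySem.List.pyGetD pref (-1) 0 + (if x < 0 then (1:Int) else 0)]) acc
      = acc ++ (List.range xs.length).map (fun i => c + negs (xs.take (i + 1))) := by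
  induction xs generalizing acc c with
  | nil => simp
  | cons x xs ih =>
    simp only [List.foldl_cons, List.length_cons]
    rw [ih (acc ++ [PySem.List.pyGetD acc (-1) 0 + (if x < 0 then (1:Int) else 0)])
        (c + (if x < 0 then (1:Int) else 0))
        (by rw [PySem.List.pyGetD_neg_one_append_singleton, h])]
    rw [h, List.range_succ_eq_map]
    simp only [List.map_cons, List.map_map, List.append_assoc, List.singleton_append]
    have hf : ((fun i => c + negs (List.take (i + 1) (x :: xs))) ∘ Nat.succ)
        = fun i => (c + if x < 0 then 1 else 0) + negs (List.take (i + 1) xs) := by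
      funext i
      simp only [Function.comp_apply, Nat.succ_eq_add_one, List.take_succ_cons, negs_cons]
      ring
    rw [hf, List.take_succ_cons, List.take_zero, negs_singleton]

lemma pref_eq (nums : List Int) :
    nums.foldl (fun pref x => pref ++ [PySem.List.pyGetD pref (-1) 0 + (if x < 0 then (1:Int) else 0)]) [0]
      = (List.range (nums.length + 1)).map (fun i => negs (nums.take i)) := by
  rw [pref_fold nums [0] 0 rfl, List.range_succ_eq_map]
  simp [negs_nil]

lemma pref_get (nums : List Int) (s : Nat) (hs : s ≤ nums.length) :
    PySem.List.pyGetD ((List.range (nums.length + 1)).map (fun i => negs (nums.take i))) (s : Int) 0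
      = negs (nums.take s) := by
  rw [PySem.List.pyGetD_natCast]
  rw [List.getD_eq_getElem _ _ (by simpa using Nat.lt_succ_of_le hs)]
  simp

-- closed form of B for 1 ≤ K ≤ n
lemma alt_eq (nums : List Int) (K : Nat) (h1 : 1 ≤ K) (h2 : K ≤ nums.length) :
    countNegElementInKLengthSubarray_alt nums (K : Int)
      = (List.range (nums.length + 1 - K)).map (fun s => negs ((nums.drop s).take K)) := by
  unfold countNegElementInKLengthSubarray_alt
  rw [pref_eq]
  have hcond : ¬ ((K : Int) < 1 ∨ (nums.length : Int) < (K : Int)) := by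
    push_neg; exact ⟨by exact_mod_cast h1, by exact_mod_cast h2⟩
  simp only [hcond, if_neg, not_false_iff]
  rw [show ((nums.length : Int) - (K : Int) + 1) = ((nums.length + 1 - K : Nat) : Int) by
    omega]
  rw [PySem.List.pyRange_zero_nat]
  rw [List.map_map]
  apply List.map_congr_left
  intro s hs
  simp only [List.mem_range] at hs
  simp only [Function.comp]
  rw [show ((s : Int) + (K : Int)) = ((s + K : Nat) : Int) by push_cast; ring]
  rw [pref_get nums (s + K) (by omega), pref_get nums s (by omega)]
  rw [show s + K = s + K from rfl, List.take_add, negs_append]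
  ring

-- A's loop invariant for 1 ≤ K, over prefixes of length m
lemma a_inv (nums : List Int) (K : Nat) (hK : 1 ≤ K) (m : Nat) (hm : m ≤ nums.length) :
    (PySem.List.pyRange 0 (m : Int) 1).foldl
      (fun (st : Int × Int × List Int) e =>
        let count := st.1
        let start := st.2.1
        let result := st.2.2
        let count := if PySem.List.pyGetD nums e 0 < 0 then count + 1 else count
        if e - start + 1 = (K : Int) then
          (if PySem.List.pyGetD nums start 0 < 0 then count - 1 else count,
           start + 1, result ++ [count])
        else (count, start, result))
      (0, 0, [])
      = (negs ((nums.take m).drop (m + 1 - K)),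
         ((m + 1 - K : Nat) : Int),
         (List.range (m + 1 - K)).map (fun s => negs ((nums.drop s).take K))) := by
  induction m with
  | zero =>
    simp [Nat.sub_eq_zero_of_le hK, negs_nil]
  | succ m ih =>
    have hm' : m ≤ nums.length := by omega
    have hmn : m < nums.length := by omega
    rw [show ((m + 1 : Nat) : Int) = (m : Int) + 1 by push_cast; ring]
    rw [PySem.List.pyRange_one_succ_right (by positivity), List.foldl_append, ih hm']
    simp only [List.foldl_cons, List.foldl_nil]
    have hget : PySem.List.pyGetD nums (m : Int) 0 = nums[m] :=
      PySem.List.pyGetD_ofNat nums m 0 hmn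
    by_cases h : K ≤ m + 1
    · have hcond : (m : Int) - ((m + 1 - K : Nat) : Int) + 1 = (K : Int) := by omega
      simp only [hcond, if_pos, hget]
      have hstart : m + 1 - K < nums.length := by omega
      have hgs : PySem.List.pyGetD nums ((m + 1 - K : Nat) : Int) 0 = nums[m + 1 - K] :=
        PySem.List.pyGetD_ofNat nums (m + 1 - K) 0 hstart
      -- window [m+1-K, m+1) count
      have hwin : (if nums[m] < 0 then negs ((nums.take m).drop (m + 1 - K)) + 1
                    else negs ((nums.take m).drop (m + 1 - K)))
          = negs ((nums.drop (m + 1 - K)).take K) := by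
        have : (nums.take (m + 1)).drop (m + 1 - K) = (nums.drop (m + 1 - K)).take K := by
          rw [List.drop_take]
          congr 1
          omega
        rw [← this]
        rw [List.take_succ, List.getElem?_eq_getElem hmn]
        simp only [Option.toList_some]
        rw [List.drop_append_of_le_length (by simp; omega), negs_append, negs_singleton]
        by_cases hx : nums[m] < 0 <;> simp [hx]
      simp only [Prod.mk.injEq]
      refine ⟨?_, ?_, ?_⟩
      · -- count after subtraction = negs ((nums.take (m+1)).drop (m+2-K))
        rw [hgs, hwin]
        have hdec : nums.drop (m + 1 - K) = nums[m + 1 - K] :: nums.drop (m + 1 - K + 1) :=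
          (List.getElem_cons_drop hstart).symm
        have htK : (nums.drop (m + 1 - K)).take K
            = nums[m + 1 - K] :: (nums.drop (m + 1 - K + 1)).take (K - 1) := by
          rw [hdec, List.take_cons (by omega : 0 < K)]
        have htail : (nums.take (m + 1)).drop (m + 1 + 1 - K)
            = (nums.drop (m + 1 - K + 1)).take (K - 1) := by
          rw [show m + 1 + 1 - K = m + 1 - K + 1 by omega, List.drop_take]
          congr 1
          omega
        rw [htail, htK, negs_cons]
        by_cases hx : nums[m + 1 - K] < 0 <;> simp [hx] <;> ring
      · omega
      · rw [show m + 1 + 1 - K = (m + 1 - K) + 1 by omega, List.range_succ, List.map_append]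
        simp [hwin]
    · have hzero : m + 1 - K = 0 := by omega
      have hzero' : m + 1 + 1 - K = 0 := by omega
      rw [hzero, hzero']
      rw [if_neg (by push_cast; omega : ¬ ((m : Int) - ((0 : Nat) : Int) + 1 = (K : Int)))]
      simp only [hget, Nat.cast_zero, List.drop_zero, List.range_zero, List.map_nil,
        Prod.mk.injEq]
      rw [List.take_succ, List.getElem?_eq_getElem hmn]
      simp only [Option.toList_some]
      rw [negs_append, negs_singleton]
      by_cases hx : nums[m] < 0 <;> simp [hx]

-- A's loop never fires for k ≤ 0 (start stays 0, every index is ≥ 0)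
lemma a_nonpos (nums : List Int) (k : Int) (hk : k ≤ 0) (a : Int) (ha : 0 ≤ a)
    (c : Int) (r : List Int) :
    ((PySem.List.pyRange a (nums.length : Int) 1).foldl
      (fun (st : Int × Int × List Int) e =>
        let count := st.1
        let start := st.2.1
        let result := st.2.2
        let count := if PySem.List.pyGetD nums e 0 < 0 then count + 1 else count
        if e - start + 1 = k then
          (if PySem.List.pyGetD nums start 0 < 0 then count - 1 else count,
           start + 1, result ++ [count])
        else (count, start, result))
      (c, 0, r)).2.2 = r := by
  by_cases hab : a < (nums.length : Int)
  · rw [PySem.List.pyRange_one_cons hab]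
    simp only [List.foldl_cons]
    have hcond : ¬ (a - 0 + 1 = k) := by omega
    simp only [hcond]
    exact a_nonpos nums k hk (a + 1) (by omega) _ r
  · rw [PySem.List.pyRange_one_eq_nil (by omega)]
    simp
termination_by ((nums.length : Int) - a).toNat
decreasing_by omega

-- ===== VERDICT (by name: the statement is the Claim_ definition above) =====
theorem countNegElementInKLengthSubarray_spec : Claim_equal_countNegElementInKLengthSubarray := by
  intro nums k _
  unfold Spec_countNegElementInKLengthSubarray
  by_cases hk : k ≤ 0
  · unfold countNegElementInKLengthSubarray countNegElementInKLengthSubarray_alt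
    rw [a_nonpos nums k hk 0 le_rfl 0 []]
    rw [if_pos (Or.inl (by omega))]
  · push_neg at hk
    have hK : k = ((k.toNat : Nat) : Int) := by omega
    set K := k.toNat with hKdef
    have hK1 : 1 ≤ K := by omega
    by_cases hKn : K ≤ nums.length
    · rw [hK]
      unfold countNegElementInKLengthSubarray
      rw [a_inv nums K hK1 nums.length le_rfl]
      rw [alt_eq nums K hK1 hKn]
    · -- k > n: A emits nothing, B returns []
      have hA : countNegElementInKLengthSubarray nums k = [] := by
        rw [hK]
        unfold countNegElementInKLengthSubarray
        rw [a_inv nums K hK1 nums.length le_rfl]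
        simp [Nat.sub_eq_zero_of_le (by omega : nums.length + 1 ≤ K)]
      have hB : countNegElementInKLengthSubarray_alt nums k = [] := by
        unfold countNegElementInKLengthSubarray_alt
        rw [if_pos (Or.inr (by omega))]
      rw [hA, hB]
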